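-- pv_equiv track=rewrite | github.com/EngBioNUS/BMSS2 | BMSS/standardfiles_generators/combinegen.py | gen_figurestatment
-- ===== SOURCE A (Python) =====
-- def gen_figurestatment(Total_Fig, variable_statement, tspan):
--     '''
--     Generates the 'plot figure' statements based on tasks and sims
--     :param variable_statement: variables for each plot in list format
--     :param Total_Fig: total number of plots in int format
--     :return Plot_statement: Plot figure statements in str format
--     '''
--     Figure_Statement = []
--     Plot_statement=""
--     time_count = 1
--     for plot_count in range(Total_Fig):#Change to meet fig count
--         Figure_Statement.append('plot "Figure ' + str(plot_count+1) + '" task' + str(time_count) +'.time vs ')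
--         Plot_statement = Plot_statement + Figure_Statement[plot_count] + variable_statement[plot_count] + '\n'
--         if (plot_count+1)%len(tspan) == 0:
--             time_count +=1
--     return Plot_statement
-- ===== SOURCE B (Python) =====
-- def gen_figurestatment(Total_Fig, variable_statement, tspan):
--     n = len(tspan)
--
--     def block(task, start):
--         # emit one task's chunk of figures, then recurse for the next task
--         if start >= Total_Fig:
--             return ''
--         stop = min(start + n, Total_Fig)
--         lines = ''.join(
--             'plot "Figure ' + str(fig) + '" task' + str(task) + '.time vs ' + v + '\n'
--             for fig, v in enumerate(variable_statement[start:stop], start + 1))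
--         return lines + block(task + 1, stop)
--
--     return block(1, 0)
-- ===== Notes on version B (the rewrite author's own statement) =====
-- stated objective: alternative
-- what changed: Replaced the single index loop with its running time_count counter and modulo-reset branch by a recursive chunk decomposition: a helper emits one task's block of len(tspan) figures at a time by slicing variable_statement and joining the block's lines, then recurses for the next task; no per-figure counter, modulo test or repeated full-string concatenation remains.
import Mathlib
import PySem

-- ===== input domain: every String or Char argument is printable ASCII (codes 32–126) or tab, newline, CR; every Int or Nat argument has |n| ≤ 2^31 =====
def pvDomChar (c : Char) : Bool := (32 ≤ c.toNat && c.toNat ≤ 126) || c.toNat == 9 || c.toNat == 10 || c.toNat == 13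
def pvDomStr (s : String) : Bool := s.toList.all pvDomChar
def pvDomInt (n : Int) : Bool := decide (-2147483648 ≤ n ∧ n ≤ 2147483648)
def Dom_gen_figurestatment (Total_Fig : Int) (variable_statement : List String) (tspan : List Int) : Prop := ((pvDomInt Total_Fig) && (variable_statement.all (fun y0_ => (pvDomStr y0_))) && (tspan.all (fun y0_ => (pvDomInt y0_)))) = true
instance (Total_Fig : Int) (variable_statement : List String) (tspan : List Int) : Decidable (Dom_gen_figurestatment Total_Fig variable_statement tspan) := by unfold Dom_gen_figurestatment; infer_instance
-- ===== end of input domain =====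

-- B replaces A's single index loop with its running time_count counter and modulo-reset branch by a
-- recursive chunk decomposition: one task's block of len(tspan) figures is emitted at a time from a
-- slice of variable_statement, then the helper recurses for the next task (objective: alternative).

-- ===== PORT A =====
-- A appends each figure string to Figure_Statement and immediately reads it back at the same
-- index; the fold keeps the same values as state (Plot_statement, time_count). Indexing
-- variable_statement[plot_count] is pyGetD with default "" — exact under Pre_ (index in range).
def gen_figurestatment (Total_Fig : Int) (variable_statement : List String) (tspan : List Int) : String :=
  ((PySem.List.pyRange 0 Total_Fig 1).foldl
    (fun (st : String × Int) pc =>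
      let fig := "plot \"Figure " ++ PySem.Int.toStr (pc + 1) ++ "\" task" ++ PySem.Int.toStr st.2 ++ ".time vs "
      let ps := st.1 ++ fig ++ PySem.List.pyGetD variable_statement pc "" ++ "\n"
      let tc := if PySem.Int.mod (pc + 1) (tspan.length : Int) = 0 then st.2 + 1 else st.2
      (ps, tc))
    ("", 1)).1

-- ===== PORT B =====
-- Source B's local recursive helper block(task, start); the extra fuel argument only makes the
-- recursion total in Lean (fuel 0 is unreachable under Pre_, where each step advances start
-- by len(tspan) ≥ 1; in Python that case is an unbounded recursion, excluded by Pre_).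
def pvBlock (Total_Fig : Int) (variable_statement : List String) (n : Int) :
    Nat → Int → Int → String
  | 0, _, _ => ""
  | fuel + 1, task, start =>
    if Total_Fig ≤ start then ""
    else
      let stop := min (start + n) Total_Fig
      let lines := PySem.Str.join ""
        ((PySem.List.enumerate (PySem.List.slice variable_statement (some start) (some stop)) (start + 1)).map
          (fun p => "plot \"Figure " ++ PySem.Int.toStr p.1 ++ "\" task" ++ PySem.Int.toStr task
            ++ ".time vs " ++ p.2 ++ "\n"))
      lines ++ pvBlock Total_Fig variable_statement n fuel (task + 1) stop

def gen_figurestatment_alt (Total_Fig : Int) (variable_statement : List String) (tspan : List Int) : String :=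
  pvBlock Total_Fig variable_statement (tspan.length : Int) (Total_Fig.toNat + 1) 1 0

-- ===== PRECONDITION & SPEC =====
-- Pre_ excludes exactly the inputs where Python A raises: ZeroDivisionError from %len(tspan)
-- when the loop runs with tspan empty, and IndexError when Total_Fig exceeds len(variable_statement).
def Pre_gen_figurestatment (Total_Fig : Int) (variable_statement : List String) (tspan : List Int) : Prop :=
  Total_Fig ≤ (variable_statement.length : Int) ∧ (0 < Total_Fig → tspan ≠ [])
instance (Total_Fig : Int) (variable_statement : List String) (tspan : List Int) : Decidable (Pre_gen_figurestatment Total_Fig variable_statement tspan) := by unfold Pre_gen_figurestatment; infer_instance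

def pvWitness_gen_figurestatment : Int × List String × List Int := (3, ["x", "y", "z"], [0, 5])

def Spec_gen_figurestatment (Total_Fig : Int) (variable_statement : List String) (tspan : List Int) (out : String) : Prop := out = gen_figurestatment_alt Total_Fig variable_statement tspan
instance (Total_Fig : Int) (variable_statement : List String) (tspan : List Int) (out : String) : Decidable (Spec_gen_figurestatment Total_Fig variable_statement tspan out) := by unfold Spec_gen_figurestatment; infer_instance

-- ===== CLAIM (what is proved, stated in full; the proofs are below) =====
def Claim_equal_gen_figurestatment : Prop := ∀ (Total_Fig : Int) (variable_statement : List String) (tspan : List Int), Dom_gen_figurestatment Total_Fig variable_statement tspan → Pre_gen_figurestatment Total_Fig variable_statement tspan → Spec_gen_figurestatment Total_Fig variable_statement tspan (gen_figurestatment Total_Fig variable_statement tspan)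

-- ===== LEMMAS AND PROOFS =====

-- the text of line i, shared closed form both sides are reduced to (proof-only)
def pvLine (variable_statement : List String) (n : Int) (i : Int) : String :=
  "plot \"Figure " ++ PySem.Int.toStr (i + 1) ++ "\" task"
    ++ PySem.Int.toStr (PySem.Int.floordiv i n + 1)
    ++ ".time vs " ++ PySem.List.pyGetD variable_statement i "" ++ "\n"

lemma inter_nil (l : List (List Char)) : List.intercalate ([] : List Char) l = l.flatten := by
  induction l with
  | nil => simp [List.intercalate]
  | cons a t ih =>
    cases t with
    | nil => simp [List.intercalate]
    | cons b u =>
      simp only [List.intercalate, List.intersperse] at *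
      simpa using ih

lemma join_empty_append (xs ys : List String) :
    PySem.Str.join "" (xs ++ ys) = PySem.Str.join "" xs ++ PySem.Str.join "" ys := by
  simp [PySem.Str.join, PySem.Chars.join, inter_nil]

lemma join_empty_append_singleton (xs : List String) (s : String) :
    PySem.Str.join "" (xs ++ [s]) = PySem.Str.join "" xs ++ s := by
  simp [PySem.Str.join, PySem.Chars.join, inter_nil]

-- A's fold equals the joined closed-form lines (same invariant as a direct reading of A)
lemma loop_invariant (variable_statement : List String) (tspan : List Int)
    (hts : tspan ≠ []) (n : Nat) :
    (PySem.List.pyRange 0 (n : Int) 1).foldl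
      (fun (st : String × Int) pc =>
        let fig := "plot \"Figure " ++ PySem.Int.toStr (pc + 1) ++ "\" task" ++ PySem.Int.toStr st.2 ++ ".time vs "
        let ps := st.1 ++ fig ++ PySem.List.pyGetD variable_statement pc "" ++ "\n"
        let tc := if PySem.Int.mod (pc + 1) (tspan.length : Int) = 0 then st.2 + 1 else st.2
        (ps, tc))
      ("", 1)
    = (PySem.Str.join ""
        ((PySem.List.pyRange 0 (n : Int) 1).map (pvLine variable_statement (tspan.length : Int))),
       ((n / tspan.length : Nat) : Int) + 1) := by
  have hL : 0 < tspan.length := List.length_pos_iff.mpr hts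
  induction n with
  | zero => simp [PySem.List.pyRange_one_eq_nil, PySem.Str.join, PySem.Chars.join, List.intercalate]
  | succ n ih =>
    have hsplit : PySem.List.pyRange 0 ((n : Int) + 1) 1
        = PySem.List.pyRange 0 (n : Int) 1 ++ [(n : Int)] :=
      PySem.List.pyRange_one_succ_right (by exact_mod_cast Nat.zero_le n)
    simp only [Nat.cast_add, Nat.cast_one]
    rw [hsplit, List.foldl_append, List.map_append, ih]
    simp only [List.foldl_cons, List.foldl_nil, List.map_cons, List.map_nil]
    rw [join_empty_append_singleton]
    have hfd : PySem.Int.floordiv (n : Int) (tspan.length : Int) = ((n / tspan.length : Nat) : Int) :=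
      PySem.Int.floordiv_natCast n tspan.length
    have hmod : PySem.Int.mod ((n : Int) + 1) (tspan.length : Int)
        = (((n + 1) % tspan.length : Nat) : Int) := by
      exact_mod_cast PySem.Int.mod_natCast (n + 1) tspan.length
    refine Prod.ext ?_ ?_
    · simp only [pvLine, hfd, String.append_assoc]
    · simp only [hmod, Nat.succ_div]
      by_cases hd : tspan.length ∣ n + 1
      · obtain ⟨k, hk⟩ := hd
        have h0 : (n + 1) % tspan.length = 0 := by rw [hk, Nat.mul_mod_right]
        rw [if_pos (show ((((n + 1) % tspan.length : Nat)) : Int) = 0 by exact_mod_cast h0),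
            if_pos ⟨k, hk⟩]
        push_cast
        ring
      · have h0 : (n + 1) % tspan.length ≠ 0 := fun h => hd (Nat.dvd_of_mod_eq_zero h)
        rw [if_neg (show ¬((((n + 1) % tspan.length : Nat)) : Int) = 0 from fun h => h0 (by exact_mod_cast h)),
            if_neg hd]
        push_cast
        ring

-- one chunk of B equals the closed-form lines for its index range
lemma chunk_eq (variable_statement : List String) (n T : Int) (k : Nat)
    (hn : 0 < n) (hT : T ≤ (variable_statement.length : Int)) (hlt : (k : Int) * n < T) :
    PySem.Str.join ""
      ((PySem.List.enumerate (PySem.List.slice variable_statement (some ((k : Int) * n)) (some (min ((k : Int) * n + n) T))) ((k : Int) * n + 1)).map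
        (fun p => "plot \"Figure " ++ PySem.Int.toStr p.1 ++ "\" task" ++ PySem.Int.toStr ((k : Int) + 1)
          ++ ".time vs " ++ p.2 ++ "\n"))
    = PySem.Str.join ""
        ((PySem.List.pyRange ((k : Int) * n) (min ((k : Int) * n + n) T) 1).map (pvLine variable_statement n)) := by
  set a : Int := (k : Int) * n with ha
  set b : Int := min (a + n) T with hb
  have ha0 : 0 ≤ a := by positivity
  have hb0 : 0 ≤ b := by
    have haT : a < T := hlt
    rcases le_total (a + n) T with h | h
    · rw [hb, min_eq_left h]; omega
    · rw [hb, min_eq_right h]; omega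
  have hab : a ≤ b := by simp only [hb]; omega
  have hbl : b ≤ (variable_statement.length : Int) := le_trans (min_le_right _ _) hT
  congr 1
  rw [PySem.List.slice_toNat variable_statement ha0 hb0]
  apply List.ext_getElem
  · simp [PySem.List.length_enumerate, PySem.List.pyRange_one, List.length_take,
      List.length_drop]
    omega
  · intro j h1 h2
    have hj : j < b.toNat - a.toNat := by
      simp only [List.length_map, PySem.List.length_enumerate, List.length_take,
        List.length_drop] at h1
      omega
    have hjl : a.toNat + j < variable_statement.length := by omega
    have hget : (List.take (b.toNat - a.toNat) (List.drop a.toNat variable_statement))[j]'(by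
        simp [List.length_take, List.length_drop]; omega) = variable_statement[a.toNat + j]'hjl := by
      rw [List.getElem_take, List.getElem_drop]
    rw [List.getElem_map, PySem.List.getElem_enumerate, List.getElem_map,
        PySem.List.getElem_pyRange_one]
    have hi : a + 1 + (j : Int) = (a + (j : Int)) + 1 := by ring
    have hfd : PySem.Int.floordiv (a + (j : Int)) n = (k : Int) := by
      rw [PySem.Int.floordiv_eq_iff_of_pos hn]
      constructor
      · simp only [ha]; omega
      · have : a + (j : Int) < a + n := by
          have : (j : Int) < b - a := by omega
          have : b - a ≤ n := by simp only [hb]; omega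
          omega
        simp only [ha] at *
        nlinarith [this]
    rw [hget]
    simp only [pvLine, hfd, hi]
    have hvg : PySem.List.pyGetD variable_statement (a + (j : Int)) "" = variable_statement[a.toNat + j]'hjl := by
      have : a + (j : Int) = ((a.toNat + j : Nat) : Int) := by omega
      rw [this, PySem.List.pyGetD_natCast]
      simp [hjl]
    rw [hvg]

-- B's recursion, started at chunk k with enough fuel, produces the closed-form tail
lemma block_invariant (variable_statement : List String) (n T : Int)
    (hn : 0 < n) (hT : T ≤ (variable_statement.length : Int)) :
    ∀ (fuel : Nat) (k : Nat), (T - (k : Int) * n).toNat < fuel →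
      pvBlock T variable_statement n fuel ((k : Int) + 1) ((k : Int) * n)
        = PySem.Str.join ""
            ((PySem.List.pyRange ((k : Int) * n) T 1).map (pvLine variable_statement n)) := by
  intro fuel
  induction fuel with
  | zero => intro k h; omega
  | succ fuel ih =>
    intro k hfuel
    rw [pvBlock]
    by_cases hend : T ≤ (k : Int) * n
    · rw [if_pos hend, PySem.List.pyRange_one_eq_nil (by omega)]
      simp [PySem.Str.join, PySem.Chars.join, List.intercalate]
    · push Not at hend
      rw [if_neg (by omega)]
      simp only []
      rw [chunk_eq variable_statement n T k hn hT hend]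
      by_cases hfull : (k : Int) * n + n ≤ T
      · have hstop : min ((k : Int) * n + n) T = ((k : Int) + 1) * n := by
          rw [min_eq_left hfull]; ring
        rw [hstop]
        have he : ((k : Int) + 1) * n = (k : Int) * n + n := by ring
        have hrec := ih (k + 1) (by push_cast; rw [he]; omega)
        push_cast at hrec ⊢
        rw [hrec, ← join_empty_append, ← List.map_append]
        congr 2
        have h1 : ((k : Int) * n) ≤ ((k : Int) + 1) * n := by rw [he]; omega
        have h2 : ((k : Int) + 1) * n ≤ T := by rw [he]; exact hfull
        exact (PySem.List.pyRange_one_append _ _ _ h1 h2).symm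
      · push Not at hfull
        have hstop : min ((k : Int) * n + n) T = T := by omega
        rw [hstop]
        have hfin : pvBlock T variable_statement n fuel ((k : Int) + 1 + 1) T = "" := by
          cases fuel with
          | zero => omega
          | succ m => rw [pvBlock, if_pos le_rfl]
        rw [hfin]
        simp

-- ===== VERDICT (by name: the statement is the Claim_ definition above) =====
theorem gen_figurestatment_spec : Claim_equal_gen_figurestatment := by
  intro Total_Fig vs ts _ hpre
  unfold Spec_gen_figurestatment gen_figurestatment gen_figurestatment_alt
  by_cases hpos : 0 < Total_Fig
  · have hts : ts ≠ [] := hpre.2 hpos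
    have hL : 0 < ts.length := List.length_pos_iff.mpr hts
    have hT : Total_Fig = ((Total_Fig.toNat : Nat) : Int) := (Int.toNat_of_nonneg (le_of_lt hpos)).symm
    have hblock := block_invariant vs (ts.length : Int) Total_Fig (by exact_mod_cast hL) hpre.1
      (Total_Fig.toNat + 1) 0 (by simp)
    simp only [Nat.cast_zero, zero_mul, zero_add] at hblock
    rw [hblock, hT, loop_invariant vs ts hts Total_Fig.toNat]
  · have h : Total_Fig ≤ 0 := not_lt.mp hpos
    rw [PySem.List.pyRange_one_eq_nil h]
    have : Total_Fig.toNat + 1 = 1 := by omega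
    rw [this, pvBlock, if_pos h]
    simp
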